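-- pv_equiv track=rewrite | github.com/GilRaitses/orcast | src/data-processing/create_ml_service_schema.py | map_to_primary_behavior
-- ===== SOURCE A (Python) =====
-- def map_to_primary_behavior(behavior):
--     """Map behavior string to primary behavior categories"""
--     if not behavior or behavior == 'unknown':
--         return 'unknown'
--
--     behavior_lower = str(behavior).lower()
--
--     if any(term in behavior_lower for term in ['feed', 'forag', 'hunt', 'prey']):
--         return 'feeding'
--     elif any(term in behavior_lower for term in ['travel', 'transit', 'moving']):
--         return 'traveling'
--     elif any(term in behavior_lower for term in ['social', 'play', 'interact']):
--         return 'socializing'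
--     elif any(term in behavior_lower for term in ['rest', 'sleep', 'stationary']):
--         return 'resting'
--     else:
--         return 'unknown'
-- ===== SOURCE B (Python) =====
-- _GROUPS = [
--     ['feed', 'forag', 'hunt', 'prey'],        # 0 -> feeding
--     ['travel', 'transit', 'moving'],          # 1 -> traveling
--     ['social', 'play', 'interact'],           # 2 -> socializing
--     ['rest', 'sleep', 'stationary'],          # 3 -> resting
-- ]
-- _CATS = ['feeding', 'traveling', 'socializing', 'resting']
--
--
-- def _match_at(s, i):
--     """Index of the highest-priority group with a keyword starting at position i (4 = none)."""
--     for idx, kws in enumerate(_GROUPS):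
--         if any(s.startswith(kw, i) for kw in kws):
--             return idx
--     return len(_GROUPS)
--
--
-- def map_to_primary_behavior(behavior):
--     """Map behavior string to primary behavior categories.
--
--     Single left-to-right scan over string positions, keeping the best
--     (lowest) category index matched so far, instead of four whole-string
--     membership tests."""
--     if not behavior or behavior == 'unknown':
--         return 'unknown'
--     s = str(behavior).lower()
--     best = 4
--     for i in range(len(s)):
--         here = _match_at(s, i)
--         if here < best:
--             best = here
--     return _CATS[best] if best < 4 else 'unknown'
-- ===== Notes on version B (the rewrite author's own statement) =====
-- stated objective: alternative
-- what changed: B does one left-to-right scan over the string's positions, at each position finding the best-priority keyword that starts there and keeping the minimum category index, instead of A's four sequential whole-string substring-membership tests.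
import Mathlib
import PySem

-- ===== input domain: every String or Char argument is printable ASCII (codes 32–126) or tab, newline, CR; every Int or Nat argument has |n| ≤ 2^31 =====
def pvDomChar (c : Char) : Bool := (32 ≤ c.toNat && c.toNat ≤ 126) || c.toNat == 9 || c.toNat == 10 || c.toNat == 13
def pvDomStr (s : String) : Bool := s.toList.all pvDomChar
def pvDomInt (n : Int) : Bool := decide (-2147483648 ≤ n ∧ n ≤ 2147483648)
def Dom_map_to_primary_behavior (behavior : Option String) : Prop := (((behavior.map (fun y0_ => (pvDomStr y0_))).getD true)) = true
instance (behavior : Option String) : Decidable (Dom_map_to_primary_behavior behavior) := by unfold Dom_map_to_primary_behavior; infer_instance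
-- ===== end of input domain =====

-- B replaces A's four whole-string substring-membership tests with one left-to-right positional scan keeping the best-priority match (alternative decomposition, same cost).


-- ===== PORT A =====
def map_to_primary_behavior (behavior : Option String) : String :=
  match behavior with
  | none => "unknown"
  | some b =>
    if b = "" ∨ b = "unknown" then "unknown"
    else
      let behavior_lower := PySem.Str.lower b
      if ["feed", "forag", "hunt", "prey"].any (fun term => PySem.Str.isIn term behavior_lower) then "feeding"
      else if ["travel", "transit", "moving"].any (fun term => PySem.Str.isIn term behavior_lower) then "traveling"
      else if ["social", "play", "interact"].any (fun term => PySem.Str.isIn term behavior_lower) then "socializing"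
      else if ["rest", "sleep", "stationary"].any (fun term => PySem.Str.isIn term behavior_lower) then "resting"
      else "unknown"

-- ===== PORT B =====
def pvGroups : List (List String) :=
  [["feed", "forag", "hunt", "prey"],
   ["travel", "transit", "moving"],
   ["social", "play", "interact"],
   ["rest", "sleep", "stationary"]]

def pvCats : List String := ["feeding", "traveling", "socializing", "resting"]

-- _match_at: first group (by index) with a keyword starting at this position; the suffix is s[i:]
def pvMatchAtGo (gs : List (List String)) (idx : Nat) (suf : List Char) : Nat :=
  match gs with
  | [] => idx
  | kws :: rest =>
    if kws.any (fun kw => PySem.Chars.startswith suf kw.toList) then idx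
    else pvMatchAtGo rest (idx + 1) suf

def pvMatchAt (suf : List Char) : Nat := pvMatchAtGo pvGroups 0 suf

-- the `for i in range(len(s))` loop: position i corresponds to the suffix s.drop i
def pvScanBest (suf : List Char) (best : Nat) : Nat :=
  match suf with
  | [] => best
  | _ :: rest =>
    let here := pvMatchAt suf
    pvScanBest rest (if here < best then here else best)

def map_to_primary_behavior_alt (behavior : Option String) : String :=
  match behavior with
  | none => "unknown"
  | some b =>
    if b = "" ∨ b = "unknown" then "unknown"
    else
      let s := (PySem.Str.lower b).toList
      let best := pvScanBest s 4
      if best < 4 then pvCats.getD best "unknown" else "unknown"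

-- ===== PRECONDITION & SPEC =====
def Spec_map_to_primary_behavior (behavior : Option String) (out : String) : Prop := out = map_to_primary_behavior_alt behavior
instance (behavior : Option String) (out : String) : Decidable (Spec_map_to_primary_behavior behavior out) := by unfold Spec_map_to_primary_behavior; infer_instance

-- ===== CLAIM =====
def Claim_equal_map_to_primary_behavior : Prop := ∀ (behavior : Option String), Dom_map_to_primary_behavior behavior → Spec_map_to_primary_behavior behavior (map_to_primary_behavior behavior)

-- ===== LEMMAS AND PROOFS =====

-- group membership test of A, at the List Char level
def pvHasKw (kws : List String) (cs : List Char) : Bool :=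
  kws.any (fun kw => PySem.Chars.isIn kw.toList cs)

def pvHasPre (kws : List String) (cs : List Char) : Bool :=
  kws.any (fun kw => PySem.Chars.startswith cs kw.toList)

-- the A-side classification as a number
def pvClassify (cs : List Char) : Nat :=
  if pvHasKw ["feed", "forag", "hunt", "prey"] cs then 0
  else if pvHasKw ["travel", "transit", "moving"] cs then 1
  else if pvHasKw ["social", "play", "interact"] cs then 2
  else if pvHasKw ["rest", "sleep", "stationary"] cs then 3
  else 4

lemma pvIsIn_cons (sub : List Char) (c : Char) (rest : List Char) :
    PySem.Chars.isIn sub (c :: rest)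
      = (PySem.Chars.startswith (c :: rest) sub || PySem.Chars.isIn sub rest) := by
  rw [Bool.eq_iff_iff]
  simp only [Bool.or_eq_true, PySem.Chars.isIn_iff_infix, PySem.Chars.startswith_iff]
  exact List.infix_cons_iff

lemma pvHasKw_cons (kws : List String) (c : Char) (rest : List Char) :
    pvHasKw kws (c :: rest) = (pvHasPre kws (c :: rest) || pvHasKw kws rest) := by
  induction kws with
  | nil => rfl
  | cons kw tl ih =>
    simp only [pvHasKw, pvHasPre, List.any_cons] at *
    rw [pvIsIn_cons kw.toList c rest, ih]
    cases PySem.Chars.startswith (c :: rest) kw.toList <;>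
      cases PySem.Chars.isIn kw.toList rest <;> simp

lemma pvHasKw_nil (kws : List String) (h : ∀ kw ∈ kws, kw.toList ≠ []) :
    pvHasKw kws [] = false := by
  induction kws with
  | nil => rfl
  | cons kw tl ih =>
    simp only [pvHasKw, List.any_cons] at *
    have : PySem.Chars.isIn kw.toList [] = false := by
      rw [PySem.Chars.isIn_eq_false_iff]
      intro hin
      exact h kw (by simp) (List.eq_nil_of_infix_nil hin)
    rw [this, ih (fun k hk => h k (by simp [hk]))]
    simp

-- matchAt expressed through the four prefix-group booleans
lemma pvMatchAt_eq (suf : List Char) :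
    pvMatchAt suf =
      (if pvHasPre ["feed", "forag", "hunt", "prey"] suf then 0
       else if pvHasPre ["travel", "transit", "moving"] suf then 1
       else if pvHasPre ["social", "play", "interact"] suf then 2
       else if pvHasPre ["rest", "sleep", "stationary"] suf then 3
       else 4) := by
  simp only [pvMatchAt, pvGroups, pvMatchAtGo, pvHasPre]
  norm_num

-- key invariant: the scan computes min best (classify cs)
set_option maxHeartbeats 4000000 in
lemma pvScanBest_eq (cs : List Char) : ∀ best : Nat, best ≤ 4 →
    pvScanBest cs best = min best (pvClassify cs) := by
  induction cs with
  | nil =>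
    intro best hb
    simp only [pvScanBest, pvClassify]
    rw [pvHasKw_nil _ (by decide), pvHasKw_nil _ (by decide),
        pvHasKw_nil _ (by decide), pvHasKw_nil _ (by decide)]
    simp; omega
  | cons c rest ih =>
    intro best hb
    simp only [pvScanBest]
    rw [ih _ (by split <;> omega)]
    rw [pvMatchAt_eq]
    simp only [pvClassify,
      pvHasKw_cons ["feed", "forag", "hunt", "prey"] c rest,
      pvHasKw_cons ["travel", "transit", "moving"] c rest,
      pvHasKw_cons ["social", "play", "interact"] c rest,
      pvHasKw_cons ["rest", "sleep", "stationary"] c rest]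
    cases pvHasPre ["feed", "forag", "hunt", "prey"] (c :: rest) <;>
      cases pvHasPre ["travel", "transit", "moving"] (c :: rest) <;>
      cases pvHasPre ["social", "play", "interact"] (c :: rest) <;>
      cases pvHasPre ["rest", "sleep", "stationary"] (c :: rest) <;>
      cases pvHasKw ["feed", "forag", "hunt", "prey"] rest <;>
      cases pvHasKw ["travel", "transit", "moving"] rest <;>
      cases pvHasKw ["social", "play", "interact"] rest <;>
      cases pvHasKw ["rest", "sleep", "stationary"] rest <;>
      simp <;> (try split_ifs) <;> omega

-- ===== VERDICT =====
theorem map_to_primary_behavior_spec : Claim_equal_map_to_primary_behavior := by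
  intro behavior _
  unfold Spec_map_to_primary_behavior map_to_primary_behavior map_to_primary_behavior_alt
  cases behavior with
  | none => rfl
  | some b =>
    by_cases hg : b = "" ∨ b = "unknown"
    · simp [hg]
    · simp only [hg, if_false]
      rw [pvScanBest_eq _ 4 (by omega)]
      have hA : ∀ (kws : List String),
          kws.any (fun term => PySem.Str.isIn term (PySem.Str.lower b))
            = pvHasKw kws (PySem.Str.lower b).toList := by
        intro kws
        simp only [pvHasKw, PySem.Str.isIn_eq]
      rw [hA, hA, hA, hA]
      simp only [pvClassify]
      cases pvHasKw ["feed", "forag", "hunt", "prey"] (PySem.Str.lower b).toList <;>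
        cases pvHasKw ["travel", "transit", "moving"] (PySem.Str.lower b).toList <;>
        cases pvHasKw ["social", "play", "interact"] (PySem.Str.lower b).toList <;>
        cases pvHasKw ["rest", "sleep", "stationary"] (PySem.Str.lower b).toList <;>
        simp [pvCats]
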